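-- pv_equiv track=rewrite | github.com/othyagen/scribe-local | app/problem_model.py | _collect_obs_ids_for_evidence
-- ===== SOURCE A (Python) =====
-- def _collect_obs_ids_for_evidence(
--     evidence: list[str],
--     obs_index: dict[str, list[str]],
-- ) -> list[str]:
--     """Collect unique observation IDs for evidence symptom names."""
--     seen: set[str] = set()
--     result: list[str] = []
--     for item in evidence:
--         key = item.lower()
--         for obs_id in obs_index.get(key, []):
--             if obs_id not in seen:
--                 seen.add(obs_id)
--                 result.append(obs_id)
--     return result
-- ===== SOURCE B (Python) =====
-- def _collect_obs_ids_for_evidence(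
--     evidence: list[str],
--     obs_index: dict[str, list[str]],
-- ) -> list[str]:
--     """Collect unique observation IDs for evidence symptom names."""
--     flat = [obs_id for item in evidence for obs_id in obs_index.get(item.lower(), [])]
--     first = {}
--     for i in range(len(flat) - 1, -1, -1):
--         first[flat[i]] = i
--     return [flat[i] for i in range(len(flat)) if first.get(flat[i]) == i]
-- ===== Notes on version B (the rewrite author's own statement) =====
-- stated objective: alternative
-- what changed: Replaces A's streaming seen-set dedup by an index-based two-pass algorithm: flatten all looked-up IDs, compute each ID's first-occurrence index with a single reverse overwrite pass over a dict, then keep exactly the positions that equal their ID's first index.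
import Mathlib
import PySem

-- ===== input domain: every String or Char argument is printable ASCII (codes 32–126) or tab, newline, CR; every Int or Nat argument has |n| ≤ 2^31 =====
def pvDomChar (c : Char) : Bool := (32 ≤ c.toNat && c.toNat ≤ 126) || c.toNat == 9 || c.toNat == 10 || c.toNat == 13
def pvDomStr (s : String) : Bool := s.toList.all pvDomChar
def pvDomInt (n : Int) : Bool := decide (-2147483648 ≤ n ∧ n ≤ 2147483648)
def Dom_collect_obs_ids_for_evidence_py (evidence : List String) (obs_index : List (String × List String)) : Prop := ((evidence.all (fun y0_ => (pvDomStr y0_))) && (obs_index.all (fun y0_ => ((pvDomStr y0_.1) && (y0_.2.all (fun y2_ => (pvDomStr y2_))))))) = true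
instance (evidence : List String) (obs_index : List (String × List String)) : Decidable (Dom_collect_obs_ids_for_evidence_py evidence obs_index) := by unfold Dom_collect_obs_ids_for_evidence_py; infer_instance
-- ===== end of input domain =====

-- B replaces A's streaming seen-set dedup by an index-based two-pass algorithm (reverse
-- overwrite pass recording each id's first-occurrence index, then a forward index filter);
-- objective: alternative, same asymptotic cost.

-- ===== PORT A =====
-- A's loops: state (seen, result); inner loop appends unseen ids, outer loop runs it per evidence item.
def collect_obs_ids_for_evidence_py (evidence : List String) (obs_index : List (String × List String)) : List String :=
  let st :=
    evidence.foldl (fun (st : PySem.Set String × List String) item =>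
      let key := PySem.Str.lower item
      (PySem.Dict.getD (PySem.Dict.mk obs_index) key []).foldl
        (fun (st : PySem.Set String × List String) obs_id =>
          if PySem.Set.contains st.1 obs_id then st
          else (PySem.Set.add st.1 obs_id, st.2 ++ [obs_id])) st)
      (PySem.Set.empty, [])
  st.2

-- ===== PORT B =====
-- B: flatten; reverse pass 'first[flat[i]] = i' (last write per key = first occurrence);
-- keep positions equal to their id's first index.  flat[i] is ported as pyGetD with
-- default "" — exact here, the indices come from range(len(flat)) so are always in range;
-- 'first.get(flat[i])' is Dict.get? (None = none).
def collect_obs_ids_for_evidence_py_alt (evidence : List String) (obs_index : List (String × List String)) : List String :=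
  let flat := evidence.flatMap (fun item => PySem.Dict.getD (PySem.Dict.mk obs_index) (PySem.Str.lower item) [])
  let first := (PySem.List.pyRange ((flat.length : Int) - 1) (-1) (-1)).foldl
      (fun (d : PySem.Dict String Int) i => d.insert (PySem.List.pyGetD flat i "") i) PySem.Dict.empty
  ((PySem.List.pyRange 0 (flat.length : Int) 1).filter
      (fun i => first.get? (PySem.List.pyGetD flat i "") == some i)).map
    (fun i => PySem.List.pyGetD flat i "")

-- ===== PRECONDITION & SPEC =====
def Spec_collect_obs_ids_for_evidence_py (evidence : List String) (obs_index : List (String × List String)) (out : List String) : Prop := out = collect_obs_ids_for_evidence_py_alt evidence obs_index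
instance (evidence : List String) (obs_index : List (String × List String)) (out : List String) : Decidable (Spec_collect_obs_ids_for_evidence_py evidence obs_index out) := by unfold Spec_collect_obs_ids_for_evidence_py; infer_instance

-- ===== CLAIM (what is proved, stated in full; the proofs are below) =====
def Claim_equal_collect_obs_ids_for_evidence_py : Prop := ∀ (evidence : List String) (obs_index : List (String × List String)), Dom_collect_obs_ids_for_evidence_py evidence obs_index → Spec_collect_obs_ids_for_evidence_py evidence obs_index (collect_obs_ids_for_evidence_py evidence obs_index)

-- ===== LEMMAS AND PROOFS =====

-- A's inner step, on a diagonal state (r, r), is exactly Set.add on both components.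
lemma pv_step_diag (r : List String) (x : String) :
    (if PySem.Set.contains r x then ((r : PySem.Set String), r)
     else (PySem.Set.add r x, r ++ [x]))
    = (PySem.Set.add r x, PySem.Set.add r x) := by
  by_cases h : x ∈ r <;> simp [PySem.Set.add, h]

-- Folding A's inner step over any list from a diagonal state stays diagonal and equals foldl Set.add.
lemma pv_foldl_diag (l : List String) (r : List String) :
    l.foldl (fun (st : PySem.Set String × List String) x =>
        if PySem.Set.contains st.1 x then st
        else (PySem.Set.add st.1 x, st.2 ++ [x])) (r, r)
    = (l.foldl PySem.Set.add r, l.foldl PySem.Set.add r) := by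
  induction l generalizing r with
  | nil => rfl
  | cons x xs ih =>
      simp only [List.foldl_cons]
      rw [show (if PySem.Set.contains r x then ((r : PySem.Set String), r)
          else (PySem.Set.add r x, r ++ [x])) = (PySem.Set.add r x, PySem.Set.add r x)
          from pv_step_diag r x]
      exact ih _

-- A's outer fold equals folding Set.add over the flattened list of looked-up ids.
lemma pv_outer_diag (evidence : List String) (obs_index : List (String × List String)) (r : List String) :
    evidence.foldl (fun (st : PySem.Set String × List String) item =>
      (PySem.Dict.getD (PySem.Dict.mk obs_index) (PySem.Str.lower item) []).foldl
        (fun (st : PySem.Set String × List String) obs_id =>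
          if PySem.Set.contains st.1 obs_id then st
          else (PySem.Set.add st.1 obs_id, st.2 ++ [obs_id])) st) (r, r)
    = ((evidence.flatMap (fun item => PySem.Dict.getD (PySem.Dict.mk obs_index) (PySem.Str.lower item) [])).foldl
        PySem.Set.add r,
       (evidence.flatMap (fun item => PySem.Dict.getD (PySem.Dict.mk obs_index) (PySem.Str.lower item) [])).foldl
        PySem.Set.add r) := by
  induction evidence generalizing r with
  | nil => rfl
  | cons e es ih =>
      simp only [List.foldl_cons, List.flatMap_cons, List.foldl_append]
      rw [pv_foldl_diag]
      exact ih _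

-- find? is pointwise: congruence over the list's members.
lemma pv_find?_congr {α : Type} {p q : α → Bool} {l : List α} (h : ∀ a ∈ l, p a = q a) :
    l.find? p = l.find? q := by
  induction l with
  | nil => rfl
  | cons a t ih =>
      simp only [List.find?]
      rw [h a (List.mem_cons_self ..)]
      cases q a with
      | true => rfl
      | false => exact ih (fun b hb => h b (List.mem_cons_of_mem _ hb))

-- find? / filter on a one-element list, as an if.
lemma pv_find?_singleton (p : Int → Bool) (a : Int) :
    List.find? p [a] = if p a then some a else none := by
  cases hpa : p a <;> simp [List.find?, hpa]

lemma pv_filter_singleton (p : Int → Bool) (a : Int) :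
    List.filter p [a] = if p a then [a] else [] := by
  cases hpa : p a <;> simp [hpa]

-- B's reverse overwrite pass: the dict's final binding for x is the FIRST index of x
-- among the processed positions (the last write wins = the smallest index).
lemma pv_dict_get (flat : List String) (k : Nat) (d : PySem.Dict String Int) (x : String) :
    ((PySem.List.pyRange ((k : Int) - 1) (-1) (-1)).foldl
        (fun (d : PySem.Dict String Int) i => d.insert (PySem.List.pyGetD flat i "") i) d).get? x
    = ((PySem.List.pyRange 0 (k : Int) 1).find?
        (fun j => PySem.List.pyGetD flat j "" == x)).or (d.get? x) := by
  induction k generalizing d with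
  | zero =>
      rw [PySem.List.pyRange_neg_one_eq_nil (by norm_num),
          PySem.List.pyRange_one_eq_nil (by norm_num)]
      rfl
  | succ k ih =>
      have hc : ((k + 1 : Nat) : Int) - 1 = (k : Int) := by push_cast; ring
      rw [hc, PySem.List.pyRange_neg_one_cons (by omega),
          show ((k + 1 : Nat) : Int) = (k : Int) + 1 by push_cast; ring,
          PySem.List.pyRange_one_succ_right (by omega),
          List.find?_append, List.foldl_cons, ih, pv_find?_singleton]
      rw [PySem.Dict.get?_insert]
      generalize PySem.List.pyGetD flat (k : Int) "" = g
      cases hf : (PySem.List.pyRange 0 (k : Int) 1).find? (fun j => PySem.List.pyGetD flat j "" == x) with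
      | some j => simp only [Option.some_or]
      | none =>
          rw [Option.none_or, Option.none_or]
          by_cases hx : x = g
          · rw [if_pos hx, if_pos (by simp [hx]), Option.some_or]
          · rw [if_neg hx, if_neg (by simp; exact fun h => hx h.symm), Option.none_or]

-- 'no index of l holds x' is exactly 'x ∉ l'.
lemma pv_find_none_iff (l : List String) (x : String) :
    ((PySem.List.pyRange 0 (l.length : Int) 1).find? (fun j => PySem.List.pyGetD l j "" == x) = none)
    ↔ x ∉ l := by
  rw [List.find?_eq_none]
  constructor
  · intro h hx
    rcases List.mem_iff_getElem.mp hx with ⟨i, hi, hix⟩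
    have hmem : ((i : Nat) : Int) ∈ PySem.List.pyRange 0 (l.length : Int) 1 := by
      rw [PySem.List.mem_pyRange_one]; omega
    apply h _ hmem
    rw [PySem.List.pyGetD_eq_getElem l "" (by omega) (by exact_mod_cast hi)]
    simp [hix]
  · intro hx j hj
    rw [PySem.List.mem_pyRange_one] at hj
    intro hb
    rw [PySem.List.pyGetD_eq_getElem l "" hj.1 hj.2] at hb
    have heq : l[j.toNat]'(by omega) = x := by simpa using hb
    exact hx (heq ▸ List.getElem_mem _)

-- Picking the positions that are their id's first index yields the first-occurrence
-- dedup of flat, i.e. set-insertion order = Set.ofList flat.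
lemma pv_pick_eq_ofList (flat : List String) :
    ((PySem.List.pyRange 0 (flat.length : Int) 1).filter
        (fun i => ((PySem.List.pyRange 0 (flat.length : Int) 1).find?
            (fun j => PySem.List.pyGetD flat j "" == PySem.List.pyGetD flat i "")) == some i)).map
      (fun i => PySem.List.pyGetD flat i "")
    = PySem.Set.ofList flat := by
  induction flat using List.reverseRecOn with
  | nil => rfl
  | append_singleton l x ih =>
      have hlen : (((l ++ [x]).length : Nat) : Int) = (l.length : Int) + 1 := by
        simp
      have hget_lt : ∀ j ∈ PySem.List.pyRange 0 (l.length : Int) 1,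
          PySem.List.pyGetD (l ++ [x]) j "" = PySem.List.pyGetD l j "" := by
        intro j hj
        rw [PySem.List.mem_pyRange_one] at hj
        rw [PySem.List.pyGetD_eq_getElem (l ++ [x]) "" hj.1 (by simp; omega),
            PySem.List.pyGetD_eq_getElem l "" hj.1 hj.2]
        exact List.getElem_append_left (by omega)
      have hget_n : PySem.List.pyGetD (l ++ [x]) (l.length : Int) "" = x := by
        rw [PySem.List.pyGetD_eq_getElem (l ++ [x]) "" (by omega) (by simp only [List.length_append, List.length_cons, List.length_nil]; push_cast; omega)]
        apply List.getElem_concat_length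
        simp
      rw [hlen, PySem.List.pyRange_one_succ_right (by omega),
          List.filter_append, List.map_append]
      have hfc : (PySem.List.pyRange 0 (l.length : Int) 1).find?
            (fun j => PySem.List.pyGetD (l ++ [x]) j "" == PySem.List.pyGetD (l ++ [x]) ((l.length : Nat) : Int) "")
          = (PySem.List.pyRange 0 (l.length : Int) 1).find?
            (fun j => PySem.List.pyGetD l j "" == x) := by
        apply pv_find?_congr
        intro j hj
        rw [hget_lt j hj, hget_n]
      -- the new position l.length contributes [x] iff x is new
      have hsingle :
          (([((l.length : Nat) : Int)]).filter
              (fun i => ((PySem.List.pyRange 0 (l.length : Int) 1 ++ [((l.length : Nat) : Int)]).find?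
                  (fun j => PySem.List.pyGetD (l ++ [x]) j "" == PySem.List.pyGetD (l ++ [x]) i "")) == some i)).map
            (fun i => PySem.List.pyGetD (l ++ [x]) i "")
          = if x ∈ l then [] else [x] := by
        rw [pv_filter_singleton]
        rw [List.find?_append, hfc, pv_find?_singleton]
        rw [hget_n]
        cases hf : (PySem.List.pyRange 0 (l.length : Int) 1).find? (fun j => PySem.List.pyGetD l j "" == x) with
        | some j =>
            have hxl : x ∈ l := by
              have hpj := List.find?_some hf
              have hjm := List.mem_of_find?_eq_some hf
              rw [PySem.List.mem_pyRange_one] at hjm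
              rw [PySem.List.pyGetD_eq_getElem l "" hjm.1 hjm.2] at hpj
              have := (beq_iff_eq).mp hpj
              exact this ▸ List.getElem_mem _
            have hjlt : j < (l.length : Int) := by
              have hjm := List.mem_of_find?_eq_some hf
              rw [PySem.List.mem_pyRange_one] at hjm
              exact hjm.2
            rw [Option.some_or, if_neg (by simp; omega)]
            simp [hxl]
        | none =>
            have hxl : x ∉ l := (pv_find_none_iff l x).mp hf
            rw [Option.none_or, if_pos (show (x == x) = true by simp),
                if_pos (show (some ((l.length : Nat) : Int) == some ((l.length : Nat) : Int)) = true by simp)]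
            rw [List.map_cons, List.map_nil, hget_n]
            simp [hxl]
      -- the old positions keep their condition and value
      have hold :
          ((PySem.List.pyRange 0 (l.length : Int) 1).filter
              (fun i => ((PySem.List.pyRange 0 (l.length : Int) 1 ++ [((l.length : Nat) : Int)]).find?
                  (fun j => PySem.List.pyGetD (l ++ [x]) j "" == PySem.List.pyGetD (l ++ [x]) i "")) == some i)).map
            (fun i => PySem.List.pyGetD (l ++ [x]) i "")
          = ((PySem.List.pyRange 0 (l.length : Int) 1).filter
              (fun i => ((PySem.List.pyRange 0 (l.length : Int) 1).find?
                  (fun j => PySem.List.pyGetD l j "" == PySem.List.pyGetD l i "")) == some i)).map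
            (fun i => PySem.List.pyGetD l i "") := by
        rw [List.filter_congr (q := fun i => ((PySem.List.pyRange 0 (l.length : Int) 1).find?
              (fun j => PySem.List.pyGetD l j "" == PySem.List.pyGetD l i "")) == some i)]
        · apply List.map_congr_left
          intro i hi
          exact hget_lt i (List.mem_filter.mp hi).1
        · intro i hi
          have hi' := hi
          rw [PySem.List.mem_pyRange_one] at hi'
          have hgi : PySem.List.pyGetD (l ++ [x]) i "" = PySem.List.pyGetD l i "" := hget_lt i hi
          simp only [hgi]
          rw [List.find?_append,
              pv_find?_congr (p := fun j => PySem.List.pyGetD (l ++ [x]) j "" == PySem.List.pyGetD l i "")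
                (q := fun j => PySem.List.pyGetD l j "" == PySem.List.pyGetD l i "")
                (fun j hj => by simp only [hget_lt j hj]),
              pv_find?_singleton]
          rw [hget_n]
          cases hf : (PySem.List.pyRange 0 (l.length : Int) 1).find?
              (fun j => PySem.List.pyGetD l j "" == PySem.List.pyGetD l i "") with
          | some j => rw [Option.some_or]
          | none =>
              rw [Option.none_or]
              by_cases hxi : (x == PySem.List.pyGetD l i "") = true
              · rw [if_pos hxi]
                have : (some ((l.length : Nat) : Int) == some i) = false := by simp; omega
                rw [this]
                simp
              · rw [if_neg hxi]
      rw [hsingle, hold, ih]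
      rw [PySem.Set.ofList_eq_foldl, PySem.Set.ofList_eq_foldl, List.foldl_append,
          List.foldl_cons, List.foldl_nil]
      by_cases hx : x ∈ l
      · have hx' : x ∈ List.foldl PySem.Set.add [] l := by
          rw [← PySem.Set.ofList_eq_foldl]; exact (PySem.Set.mem_ofList l x).mpr hx
        simp [PySem.Set.add, hx', hx]
      · have hx' : x ∉ List.foldl PySem.Set.add [] l := by
          rw [← PySem.Set.ofList_eq_foldl]
          exact fun h => hx ((PySem.Set.mem_ofList l x).mp h)
        simp [PySem.Set.add, hx', hx]

-- ===== VERDICT (by name: the statement is the Claim_ definition above) =====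
theorem collect_obs_ids_for_evidence_py_spec : Claim_equal_collect_obs_ids_for_evidence_py := by
  intro evidence obs_index _
  show collect_obs_ids_for_evidence_py evidence obs_index
      = collect_obs_ids_for_evidence_py_alt evidence obs_index
  unfold collect_obs_ids_for_evidence_py collect_obs_ids_for_evidence_py_alt
  rw [show (PySem.Set.empty : PySem.Set String) = ([] : List String) from rfl]
  rw [pv_outer_diag]
  simp only [pv_dict_get, PySem.Dict.get?_empty, Option.or_none]
  rw [pv_pick_eq_ofList, PySem.Set.ofList_eq_foldl]
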